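-- pv_equiv track=rewrite | github.com/RajdeepGG/support-chatbot | backend/guard_rails.py | _has_excessive_repetition
-- ===== SOURCE A (Python) =====
-- def _has_excessive_repetition(text: str) -> bool:
--     """Check for excessive character or word repetition"""
--     # Simple repetition check
--     words = text.split()
--     if len(words) > 10:
--         # Check if any word repeats too many times
--         word_counts = {}
--         for word in words:
--             word_counts[word] = word_counts.get(word, 0) + 1
--             if word_counts[word] > 10:  # More than 10 repetitions
--                 return True
--
--     return False
-- ===== SOURCE B (Python) =====
-- def _has_excessive_repetition(text: str) -> bool:
--     """Check for excessive word repetition: sort, then scan runs of equal words."""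
--     words = text.split()
--     if len(words) <= 10:
--         return False
--     run = 0
--     prev = None
--     for w in sorted(words):
--         run = run + 1 if w == prev else 1
--         if run > 10:
--             return True
--         prev = w
--     return False
-- ===== Notes on version B (the rewrite author's own statement) =====
-- stated objective: alternative
-- what changed: Replaces the dict-of-counts loop with sort-then-scan: sort the words so equal words are adjacent and track the current run length, returning True when a run exceeds 10.
import Mathlib
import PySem

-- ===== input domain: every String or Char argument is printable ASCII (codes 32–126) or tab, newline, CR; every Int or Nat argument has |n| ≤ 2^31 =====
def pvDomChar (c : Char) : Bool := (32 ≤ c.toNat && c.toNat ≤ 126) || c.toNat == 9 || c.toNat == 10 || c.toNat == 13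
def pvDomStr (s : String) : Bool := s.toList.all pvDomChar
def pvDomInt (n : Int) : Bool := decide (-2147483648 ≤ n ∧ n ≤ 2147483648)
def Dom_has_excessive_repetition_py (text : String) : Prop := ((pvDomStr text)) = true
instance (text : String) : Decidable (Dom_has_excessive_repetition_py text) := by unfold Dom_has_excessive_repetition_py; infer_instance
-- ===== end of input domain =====

-- B replaces A's dict-of-counts loop with sort-then-scan of runs of equal words (alternative decomposition, same result).

-- ===== PORT A =====
-- the counting loop of A, with early return when a count exceeds 10
def pvLoopA : List String → PySem.Dict String Int → Bool
  | [], _ => false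
  | w :: rest, d =>
      let c := d.getD w 0 + 1
      if c > 10 then true else pvLoopA rest (d.insert w c)

def has_excessive_repetition_py (text : String) : Bool :=
  let words := PySem.Str.split₀ text
  if PySem.List.len words > 10 then
    pvLoopA words PySem.Dict.empty
  else false

-- ===== PORT B =====
-- the run-scanning loop of B over the sorted word list (prev = None encoded as Option)
def pvLoopB : Option String → Int → List String → Bool
  | _, _, [] => false
  | prev, run, w :: rest =>
      let run' := if some w = prev then run + 1 else 1
      if run' > 10 then true else pvLoopB (some w) run' rest

def has_excessive_repetition_py_alt (text : String) : Bool :=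
  let words := PySem.Str.split₀ text
  if PySem.List.len words ≤ 10 then false
  else pvLoopB none 0 (PySem.List.sorted words (fun w => w) false)

-- ===== PRECONDITION & SPEC =====
def Spec_has_excessive_repetition_py (text : String) (out : Bool) : Prop := out = has_excessive_repetition_py_alt text
instance (text : String) (out : Bool) : Decidable (Spec_has_excessive_repetition_py text out) := by unfold Spec_has_excessive_repetition_py; infer_instance

-- ===== CLAIM (what is proved, stated in full; the proofs are below) =====
def Claim_equal_has_excessive_repetition_py : Prop := ∀ (text : String), Dom_has_excessive_repetition_py text → Spec_has_excessive_repetition_py text (has_excessive_repetition_py text)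

-- ===== LEMMAS AND PROOFS =====

-- A's loop returns true iff some remaining word's dict value plus its remaining count exceeds 10
lemma pvLoopA_iff (rest : List String) (d : PySem.Dict String Int) :
    pvLoopA rest d = true ↔ ∃ w ∈ rest, d.getD w 0 + rest.count w > 10 := by
  induction rest generalizing d with
  | nil => simp [pvLoopA]
  | cons w rest ih =>
    simp only [pvLoopA]
    by_cases hc : d.getD w 0 + 1 > 10
    · rw [if_pos hc]
      constructor
      · intro _
        refine ⟨w, by simp, ?_⟩
        have : (w :: rest).count w = rest.count w + 1 := by simp
        omega
      · intro _; rfl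
    · rw [if_neg hc, ih]
      constructor
      · rintro ⟨v, hv, hgt⟩
        by_cases hvw : v = w
        · subst hvw
          refine ⟨v, by simp, ?_⟩
          rw [PySem.Dict.getD_insert, if_pos rfl] at hgt
          have : (v :: rest).count v = rest.count v + 1 := by simp
          omega
        · rw [PySem.Dict.getD_insert, if_neg hvw] at hgt
          refine ⟨v, by simp [hv], ?_⟩
          have : (w :: rest).count v = rest.count v := by simp [List.count_cons, hvw, Ne.symm hvw]
          omega
      · rintro ⟨v, hv, hgt⟩
        by_cases hvw : v = w
        · subst hvw
          have hmem : v ∈ rest := by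
            by_contra hnm
            have h0 : rest.count v = 0 := List.count_eq_zero.mpr hnm
            have : (v :: rest).count v = 1 := by simp [List.count_cons, h0]
            omega
          refine ⟨v, hmem, ?_⟩
          rw [PySem.Dict.getD_insert, if_pos rfl]
          have : (v :: rest).count v = rest.count v + 1 := by simp
          omega
        · have hmem : v ∈ rest := by
            rcases List.mem_cons.mp hv with h | h
            · exact absurd h hvw
            · exact h
          refine ⟨v, hmem, ?_⟩
          rw [PySem.Dict.getD_insert, if_neg hvw]
          have : (w :: rest).count v = rest.count v := by simp [List.count_cons, hvw, Ne.symm hvw]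
          omega

-- B's run loop on a sorted tail: true iff the current run can be extended past 10, or some later word repeats > 10 times
lemma pvLoopB_iff (rest : List String) (prev : String) (r : Int)
    (hs : rest.Pairwise (· ≤ ·)) (hp : ∀ x ∈ rest, prev ≤ x)
    (hr1 : 1 ≤ r) (hr10 : r ≤ 10) :
    pvLoopB (some prev) r rest = true ↔
      (r + rest.count prev > 10 ∨ ∃ w ∈ rest, w ≠ prev ∧ rest.count w > 10) := by
  induction rest generalizing prev r with
  | nil => simp [pvLoopB]; omega
  | cons w rest ih =>
    have hs' : rest.Pairwise (· ≤ ·) := (List.pairwise_cons.mp hs).2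
    have hw : ∀ x ∈ rest, w ≤ x := (List.pairwise_cons.mp hs).1
    simp only [pvLoopB]
    by_cases hwp : w = prev
    · subst hwp
      rw [if_pos rfl]
      have hcnt : (w :: rest).count w = rest.count w + 1 := by simp
      by_cases hbig : r + 1 > 10
      · rw [if_pos hbig]
        constructor
        · intro _; left; omega
        · intro _; rfl
      · rw [if_neg hbig, ih w (r + 1) hs' hw (by omega) (by omega)]
        constructor
        · rintro (h | ⟨v, hv, hvne, hvc⟩)
          · left; omega
          · right
            refine ⟨v, by simp [hv], hvne, ?_⟩
            have : (w :: rest).count v = rest.count v := by simp [List.count_cons, hvne, Ne.symm hvne]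
            omega
        · rintro (h | ⟨v, hv, hvne, hvc⟩)
          · left; omega
          · rcases List.mem_cons.mp hv with h' | h'
            · exact absurd h' hvne
            · right
              refine ⟨v, h', hvne, ?_⟩
              have : (w :: rest).count v = rest.count v := by simp [List.count_cons, hvne, Ne.symm hvne]
              omega
    · have hlt : prev < w := lt_of_le_of_ne (hp w (by simp)) (fun h => hwp h.symm)
      have hne : ¬ (some w = some prev) := by simp [hwp]
      rw [if_neg hne, if_neg (by omega : ¬ ((1 : Int) > 10)),
        ih w 1 hs' hw (by omega) (by omega)]
      have hprev0 : (w :: rest).count prev = 0 := by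
        refine List.count_eq_zero.mpr ?_
        intro hmem
        rcases List.mem_cons.mp hmem with h' | h'
        · exact absurd h' (ne_of_lt hlt)
        · exact absurd rfl (ne_of_lt (lt_of_lt_of_le hlt (hw _ h')))
      constructor
      · rintro (h | ⟨v, hv, hvne, hvc⟩)
        · right
          refine ⟨w, by simp, fun h' => hwp h', ?_⟩
          have : (w :: rest).count w = rest.count w + 1 := by simp
          omega
        · right
          have hvp : v ≠ prev := by
            intro h'; subst h'
            exact absurd rfl (ne_of_lt (lt_of_lt_of_le hlt (hw _ hv)))
          refine ⟨v, by simp [hv], hvp, ?_⟩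
          have : (w :: rest).count v = rest.count v := by simp [List.count_cons, hvne, Ne.symm hvne]
          omega
      · rintro (h | ⟨v, hv, hvne, hvc⟩)
        · rw [hprev0] at h; omega
        · rcases List.mem_cons.mp hv with h' | h'
          · subst h'
            left
            have : (v :: rest).count v = rest.count v + 1 := by simp
            omega
          · by_cases hvw : v = w
            · subst hvw
              left
              have : (v :: rest).count v = rest.count v + 1 := by simp
              omega
            · right
              refine ⟨v, h', hvw, ?_⟩
              have : (w :: rest).count v = rest.count v := by simp [List.count_cons, hvw, Ne.symm hvw]
              omega

-- B's full scan over a sorted list: true iff some word repeats more than 10 times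
lemma pvLoopB_start (ws : List String) (hs : ws.Pairwise (· ≤ ·)) :
    pvLoopB none 0 ws = true ↔ ∃ w ∈ ws, ws.count w > 10 := by
  cases ws with
  | nil => simp [pvLoopB]
  | cons w rest =>
    have hs' : rest.Pairwise (· ≤ ·) := (List.pairwise_cons.mp hs).2
    have hw : ∀ x ∈ rest, w ≤ x := (List.pairwise_cons.mp hs).1
    simp only [pvLoopB]
    rw [if_neg (by simp : ¬ (some w = (none : Option String))),
      if_neg (by omega : ¬ ((1 : Int) > 10)),
      pvLoopB_iff rest w 1 hs' hw (by omega) (by omega)]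
    constructor
    · rintro (h | ⟨v, hv, hvne, hvc⟩)
      · refine ⟨w, by simp, ?_⟩
        have : (w :: rest).count w = rest.count w + 1 := by simp
        omega
      · refine ⟨v, by simp [hv], ?_⟩
        have : (w :: rest).count v = rest.count v := by simp [List.count_cons, hvne, Ne.symm hvne]
        omega
    · rintro ⟨v, hv, hvc⟩
      by_cases hvw : v = w
      · subst hvw
        left
        have : (v :: rest).count v = rest.count v + 1 := by simp
        omega
      · right
        rcases List.mem_cons.mp hv with h' | h'
        · exact absurd h' hvw
        · refine ⟨v, h', hvw, ?_⟩
          have : (w :: rest).count v = rest.count v := by simp [List.count_cons, hvw, Ne.symm hvw]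
          omega

-- ===== VERDICT (by name: the statement is the Claim_ definition above) =====
theorem has_excessive_repetition_py_spec : Claim_equal_has_excessive_repetition_py := by
  intro text _
  show has_excessive_repetition_py text = has_excessive_repetition_py_alt text
  show (if PySem.List.len (PySem.Str.split₀ text) > 10 then
          pvLoopA (PySem.Str.split₀ text) PySem.Dict.empty else false) =
       (if PySem.List.len (PySem.Str.split₀ text) ≤ 10 then false
        else pvLoopB none 0 (PySem.List.sorted (PySem.Str.split₀ text) (fun w => w) false))
  set words := PySem.Str.split₀ text with hwords
  by_cases hlen : PySem.List.len words > 10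
  · rw [if_pos hlen, if_neg (by omega : ¬ PySem.List.len words ≤ 10)]
    set ws := PySem.List.sorted words (fun w => w) false with hws
    have hperm : ws.Perm words := PySem.List.sorted_perm words (fun w => w) false
    have hsorted : ws.Pairwise (· ≤ ·) := by
      have := PySem.List.sorted_pairwise words (fun w => w)
      simpa using this
    have hA : pvLoopA words PySem.Dict.empty = true ↔ ∃ w ∈ words, words.count w > 10 := by
      rw [pvLoopA_iff]
      constructor
      · rintro ⟨w, hw, h⟩; exact ⟨w, hw, by simpa [PySem.Dict.getD_empty] using h⟩
      · rintro ⟨w, hw, h⟩; exact ⟨w, hw, by simpa [PySem.Dict.getD_empty] using h⟩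
    have hB : pvLoopB none 0 ws = true ↔ ∃ w ∈ words, words.count w > 10 := by
      rw [pvLoopB_start ws hsorted]
      constructor
      · rintro ⟨w, hw, h⟩
        exact ⟨w, hperm.mem_iff.mp hw, by rwa [hperm.count_eq] at h⟩
      · rintro ⟨w, hw, h⟩
        exact ⟨w, hperm.mem_iff.mpr hw, by rwa [hperm.count_eq]⟩
    cases hb : pvLoopB none 0 ws with
    | true => exact hA.mpr (hB.mp hb)
    | false =>
      cases ha : pvLoopA words PySem.Dict.empty with
      | false => rfl
      | true =>
        rw [hB.mpr (hA.mp ha)] at hb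
        exact absurd hb (by simp)
  · rw [if_neg hlen, if_pos (by omega : PySem.List.len words ≤ 10)]
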